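-- pv_equiv track=rewrite | github.com/jpfalc/knight_mover | knight_mover_speedtest.py | make_turn_map
-- ===== SOURCE A (Python) =====
-- import math
--
-- def make_turn_map(max_size):
--     turn_list = []
--     turn_number = 0
--     direction = 1
--     while (len(turn_list) < max_size):
--         turn_number += 1
--         for i in range(1, math.ceil(turn_number/2) + 1):
--             turn_list.append(direction)
--         direction = direction % 4 + 1
--     return(turn_list[0:max_size]) # truncates the list
-- ===== SOURCE B (Python) =====
-- import math
--
-- def make_turn_map(max_size):
--     # Closed form per index: index i belongs to the group numbered isqrt(4*i+3)
--     # (group lengths grow by one every second group; direction cycles through four values).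
--     return [(math.isqrt(4 * i + 3) - 1) % 4 + 1 for i in range(max_size)]
-- ===== Notes on version B (the rewrite author's own statement) =====
-- stated objective: simpler
-- what changed: Replaces A's accumulate-and-truncate while loop (append each run, then slice) with a one-line per-index closed form: element i is (isqrt(4*i+3)-1) % 4 + 1.
import Mathlib
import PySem

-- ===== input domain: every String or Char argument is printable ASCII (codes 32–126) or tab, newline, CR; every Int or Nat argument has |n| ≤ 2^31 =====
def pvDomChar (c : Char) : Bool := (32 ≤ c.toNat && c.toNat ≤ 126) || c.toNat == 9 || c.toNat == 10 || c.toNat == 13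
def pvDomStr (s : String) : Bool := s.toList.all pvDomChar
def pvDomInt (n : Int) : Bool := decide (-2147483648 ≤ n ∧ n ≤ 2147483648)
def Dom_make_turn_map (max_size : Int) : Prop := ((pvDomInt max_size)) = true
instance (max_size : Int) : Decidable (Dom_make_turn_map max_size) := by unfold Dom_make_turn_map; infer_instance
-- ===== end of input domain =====

-- B replaces A's accumulate-and-truncate while loop with a per-index closed form
-- (element i is (isqrt(4*i+3)-1) % 4 + 1), computed in a single comprehension.


-- ===== PORT A =====
-- math.ceil(t/2) for an integer t: exact as -((-t) // 2) on the whole Int domain here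
-- (Python computes it through a float, exact for |t| ≤ 2^31).
def pvCeilHalf (t : Int) : Int := -(PySem.Int.floordiv (-t) 2)

-- the while loop; fuel = max_size.toNat is enough since every iteration appends ≥ 1 element
def pvLoopA : Nat → List Int → Int → Int → Int → List Int
  | 0, turn_list, _, _, _ => turn_list
  | fuel + 1, turn_list, turn_number, direction, max_size =>
    if (turn_list.length : Int) < max_size then
      let tn := turn_number + 1
      let tl := (PySem.List.pyRange 1 (pvCeilHalf tn + 1) 1).foldl
                  (fun acc _ => acc ++ [direction]) turn_list
      pvLoopA fuel tl tn (PySem.Int.mod direction 4 + 1) max_size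
    else turn_list

def make_turn_map (max_size : Int) : List Int :=
  PySem.List.slice (pvLoopA max_size.toNat [] 0 1 max_size) (some 0) (some max_size)

-- ===== PORT B =====
-- math.isqrt ported as Nat.sqrt (the loop indices i are nonnegative)
def make_turn_map_alt (max_size : Int) : List Int :=
  (PySem.List.pyRange 0 max_size 1).map
    (fun i => PySem.Int.mod ((Nat.sqrt (4 * i + 3).toNat : Int) - 1) 4 + 1)

-- ===== PRECONDITION & SPEC =====
def Spec_make_turn_map (max_size : Int) (out : List Int) : Prop := out = make_turn_map_alt max_size
instance (max_size : Int) (out : List Int) : Decidable (Spec_make_turn_map max_size out) := by unfold Spec_make_turn_map; infer_instance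

-- ===== CLAIM (what is proved, stated in full; the proofs are below) =====
def Claim_equal_make_turn_map : Prop := ∀ (max_size : Int), Dom_make_turn_map max_size → Spec_make_turn_map max_size (make_turn_map max_size)

-- ===== LEMMAS AND PROOFS =====

-- the i-th element of the turn map, closed form
def pvSeq (i : Nat) : Int := ((Nat.sqrt (4 * i + 3) : Int) - 1) % 4 + 1

-- number of elements after t completed groups
def pvGL (t : Nat) : Nat := (t + 1) * (t + 1) / 4

-- direction of group t+1 (the value of `direction` entering iteration t+1)
def pvDir (t : Nat) : Int := ((t % 4 : Nat) : Int) + 1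

lemma pvSeq_eq_dir (t i : Nat) (h1 : pvGL t ≤ i) (h2 : i < pvGL (t + 1)) :
    pvSeq i = pvDir t := by
  have h1' : (t + 1) * (t + 1) ≤ 4 * i + 3 := by
    unfold pvGL at h1
    generalize (t + 1) * (t + 1) = u at h1 ⊢
    omega
  have h2' : 4 * i + 3 < (t + 2) * (t + 2) := by
    unfold pvGL at h2
    generalize (t + 2) * (t + 2) = v at h2 ⊢
    omega
  have hs : Nat.sqrt (4 * i + 3) = t + 1 := by
    have hle : t + 1 ≤ Nat.sqrt (4 * i + 3) := Nat.le_sqrt.mpr h1'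
    have hlt : Nat.sqrt (4 * i + 3) < t + 2 := Nat.sqrt_lt.mpr h2'
    omega
  unfold pvSeq pvDir
  rw [hs]
  push_cast
  omega

lemma pvGL_succ (t : Nat) : pvGL (t + 1) = pvGL t + (t + 2) / 2 := by
  unfold pvGL
  rcases Nat.even_or_odd t with ⟨k, hk⟩ | ⟨k, hk⟩
  · subst hk
    have h1 : (k + k + 1) * (k + k + 1) = 4 * (k * k + k) + 1 := by ring
    have h2 : (k + k + 1 + 1) * (k + k + 1 + 1) = 4 * (k * k + 2 * k + 1) := by ring
    rw [h1, h2]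
    generalize k * k = w
    omega
  · subst hk
    have h1 : (2 * k + 1 + 1) * (2 * k + 1 + 1) = 4 * (k * k + 2 * k + 1) := by ring
    have h2 : (2 * k + 1 + 1 + 1) * (2 * k + 1 + 1 + 1) = 4 * (k * k + 3 * k + 2) + 1 := by ring
    rw [h1, h2]
    generalize k * k = w
    omega

lemma pvCeilHalf_cast (t : Nat) : pvCeilHalf ((t : Int) + 1) = (((t + 2) / 2 : Nat) : Int) := by
  unfold pvCeilHalf
  rw [PySem.Int.neg_floordiv_neg_eq_iff_of_pos (by norm_num)]
  constructor
  · push_cast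
    omega
  · push_cast
    omega

lemma pvDir_succ (t : Nat) : PySem.Int.mod (pvDir t) 4 + 1 = pvDir (t + 1) := by
  rw [PySem.Int.mod_eq_emod_of_pos (by norm_num)]
  unfold pvDir
  push_cast
  omega

-- one iteration of the while-loop body turns the prefix for t groups into the prefix for t+1
lemma pvGroup_step (t : Nat) :
    (PySem.List.pyRange 1 (pvCeilHalf ((t : Int) + 1) + 1) 1).foldl
        (fun acc _ => acc ++ [pvDir t]) ((List.range (pvGL t)).map pvSeq)
      = (List.range (pvGL (t + 1))).map pvSeq := by
  have hfold : ∀ (l : List Int) (init : List Int) (d : Int),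
      l.foldl (fun acc _ => acc ++ [d]) init = init ++ List.replicate l.length d := by
    intro l
    induction l with
    | nil => intro init d; simp
    | cons x xs ih =>
        intro init d
        simp [List.foldl_cons, ih, List.replicate_succ, List.append_assoc]
  rw [hfold, PySem.List.length_pyRange_one, pvCeilHalf_cast]
  have hlen : ((((t + 2) / 2 : Nat) : Int) + 1 - 1).toNat = (t + 2) / 2 := by
    push_cast; omega
  rw [hlen, pvGL_succ, List.range_add, List.map_append]
  congr 1
  rw [List.map_map]
  have : List.map (pvSeq ∘ fun x => pvGL t + x) (List.range ((t + 2) / 2))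
       = List.map (Function.const Nat (pvDir t)) (List.range ((t + 2) / 2)) := by
    apply List.map_congr_left
    intro j hj
    rw [List.mem_range] at hj
    exact pvSeq_eq_dir t (pvGL t + j) (by omega) (by rw [pvGL_succ]; omega)
  rw [this, List.map_const, List.length_range]

-- loop invariant: starting from the prefix for t groups, with enough fuel the loop
-- ends in the prefix for some k groups covering at least max_size.toNat elements
lemma pvLoopA_spec (fuel : Nat) : ∀ (t : Nat) (ms : Int), ms.toNat ≤ pvGL t + fuel →
    ∃ k : Nat, pvLoopA fuel ((List.range (pvGL t)).map pvSeq) (t : Int) (pvDir t) ms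
        = (List.range (pvGL k)).map pvSeq ∧ ms.toNat ≤ pvGL k := by
  induction fuel with
  | zero =>
      intro t ms h
      exact ⟨t, rfl, by omega⟩
  | succ fuel ih =>
      intro t ms h
      rw [pvLoopA]
      by_cases hlt : ((((List.range (pvGL t)).map pvSeq).length : Nat) : Int) < ms
      · rw [if_pos hlt]
        have hcast : (t : Int) + 1 = ((t + 1 : Nat) : Int) := by push_cast; ring
        dsimp only
        rw [pvGroup_step, pvDir_succ, hcast]
        apply ih (t + 1) ms
        have : pvGL t + 1 ≤ pvGL (t + 1) := by rw [pvGL_succ]; omega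
        omega
      · rw [if_neg hlt]
        refine ⟨t, rfl, ?_⟩
        simp only [List.length_map, List.length_range] at hlt
        omega

lemma pvAlt_eq (ms : Int) : make_turn_map_alt ms = (List.range ms.toNat).map pvSeq := by
  unfold make_turn_map_alt
  rw [PySem.List.pyRange_one, List.map_map]
  simp only [Int.sub_zero]
  apply List.map_congr_left
  intro j hj
  simp only [Function.comp_apply, zero_add]
  rw [PySem.Int.mod_eq_emod_of_pos (by norm_num)]
  unfold pvSeq
  have hn : ((4 * (j : Int) + 3)).toNat = 4 * j + 3 := by omega
  rw [hn]

-- ===== VERDICT (by name: the statement is the Claim_ definition above) =====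
theorem make_turn_map_spec : Claim_equal_make_turn_map := by
  intro ms _
  unfold Spec_make_turn_map make_turn_map
  by_cases hms : ms ≤ 0
  · have h0 : ms.toNat = 0 := by omega
    rw [h0, pvAlt_eq, h0]
    simp [pvLoopA, PySem.List.slice]
  · have hms' : (0 : Int) < ms := by omega
    obtain ⟨k, hres, hlen⟩ := pvLoopA_spec ms.toNat 0 ms (by unfold pvGL; omega)
    have h0 : pvGL 0 = 0 := by unfold pvGL; omega
    have hdir : pvDir 0 = 1 := by unfold pvDir; norm_num
    rw [h0] at hres
    simp only [List.range_zero, List.map_nil] at hres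
    rw [hdir] at hres
    rw [show ((0 : Nat) : Int) = 0 from rfl] at hres
    have hb : (0 : Int) ≤ ms := by omega
    rw [hres, PySem.List.slice_zero_start, PySem.List.slice_to _ hb,
        ← List.map_take, List.take_range, pvAlt_eq]
    congr 2
    omega
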